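-- pv_equiv track=rewrite | github.com/shirleyisdreaming/RANSAC | ransac.py | find_accurate
-- ===== SOURCE A (Python) =====
-- def find_accurate(dis_list):
--     count=0
--     dis_list_start=[]
--     dis_list_end=[]
--     for i in range(len(dis_list)-1):
--         if (dis_list[i+1]-dis_list[i]<2):
--             count=count+1
--         else:
--            dis_list_start.append(dis_list[i-count])
--            dis_list_end.append(dis_list[i])
--            count=0
--     return dis_list_start,dis_list_end
-- ===== SOURCE B (Python) =====
-- def find_accurate(dis_list):
--     # Group the list into runs of close values first, then project starts/ends.
--     runs = []
--     cur_run = []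
--     for v in dis_list:
--         if cur_run and v - cur_run[-1] < 2:
--             cur_run.append(v)
--         else:
--             if cur_run:
--                 runs.append(cur_run)
--             cur_run = [v]
--     # the trailing run (reaching the end of the list) is not recorded
--     dis_list_start = [r[0] for r in runs]
--     dis_list_end = [r[-1] for r in runs]
--     return dis_list_start, dis_list_end
-- ===== Notes on version B (the rewrite author's own statement) =====
-- stated objective: alternative
-- what changed: Replaces A's fused loop over index pairs with a run-length counter by a grouping pass that partitions the list into runs of close values (list of lists), followed by two projection passes taking each recorded run's first and last element.
import Mathlib
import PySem

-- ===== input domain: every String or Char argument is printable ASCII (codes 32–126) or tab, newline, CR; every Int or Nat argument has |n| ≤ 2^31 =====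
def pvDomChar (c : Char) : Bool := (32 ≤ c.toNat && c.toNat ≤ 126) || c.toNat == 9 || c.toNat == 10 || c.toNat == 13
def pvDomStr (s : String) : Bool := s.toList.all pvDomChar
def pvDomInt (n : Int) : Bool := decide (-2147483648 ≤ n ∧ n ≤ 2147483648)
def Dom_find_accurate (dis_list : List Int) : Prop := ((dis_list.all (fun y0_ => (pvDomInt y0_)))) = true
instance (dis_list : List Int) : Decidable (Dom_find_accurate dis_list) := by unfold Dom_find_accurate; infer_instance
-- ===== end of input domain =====

-- B replaces A's fused index loop with a run-length counter by a grouping pass into runs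
-- (list of lists) plus two projection passes; same O(n) cost, different decomposition.

-- ===== PORT A =====
-- one step of A's for-loop body; state = (count, dis_list_start, dis_list_end)
def faStepA (d : List Int) (acc : Int × List Int × List Int) (i : Int) : Int × List Int × List Int :=
  if PySem.List.pyGetD d (i + 1) 0 - PySem.List.pyGetD d i 0 < 2 then
    (acc.1 + 1, acc.2.1, acc.2.2)
  else
    (0, acc.2.1 ++ [PySem.List.pyGetD d (i - acc.1) 0], acc.2.2 ++ [PySem.List.pyGetD d i 0])

def find_accurate (dis_list : List Int) : List Int × List Int :=
  let st := (PySem.List.pyRange 0 ((dis_list.length : Int) - 1) 1).foldl (faStepA dis_list) (0, [], [])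
  (st.2.1, st.2.2)

-- ===== PORT B =====
-- one step of B's grouping loop; state = (runs, cur_run)
def fgStep (acc : List (List Int) × List Int) (v : Int) : List (List Int) × List Int :=
  if acc.2 ≠ [] ∧ v - acc.2.getLastD 0 < 2 then
    (acc.1, acc.2 ++ [v])
  else
    ((if acc.2 ≠ [] then acc.1 ++ [acc.2] else acc.1), [v])

def find_accurate_alt (dis_list : List Int) : List Int × List Int :=
  let st := dis_list.foldl fgStep ([], [])
  -- the trailing run st.2 is not recorded (as in Source B); runs are nonempty, so the
  -- defaults in r[0] / r[-1] are never used
  (st.1.map (fun r => PySem.List.pyGetD r 0 0), st.1.map (fun r => r.getLastD 0))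

-- ===== PRECONDITION & SPEC =====
def Spec_find_accurate (dis_list : List Int) (out : List Int × List Int) : Prop := out = find_accurate_alt dis_list
instance (dis_list : List Int) (out : List Int × List Int) : Decidable (Spec_find_accurate dis_list out) := by unfold Spec_find_accurate; infer_instance

-- ===== CLAIM (what is proved, stated in full; the proofs are below) =====
def Claim_equal_find_accurate : Prop := ∀ (dis_list : List Int), Dom_find_accurate dis_list → Spec_find_accurate dis_list (find_accurate dis_list)

-- ===== LEMMAS AND PROOFS =====

-- Invariant relating A's fold over indices 0..n-1 to B's fold over the first n+1 elements:
-- A's count is the current run's length minus one, A's output lists are the projections of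
-- B's recorded runs, and the pyGetD lookups A will make agree with the current run's ends.
lemma fa_inv (d : List Int) (n : Nat) (hn : n + 1 ≤ d.length) :
    let a := (PySem.List.pyRange 0 (n : Int) 1).foldl (faStepA d) (0, [], [])
    let b := (d.take (n + 1)).foldl fgStep ([], [])
    b.2 ≠ [] ∧
    a.1 = (b.2.length : Int) - 1 ∧
    a.2.1 = b.1.map (fun r => PySem.List.pyGetD r 0 0) ∧
    a.2.2 = b.1.map (fun r => r.getLastD 0) ∧
    b.2.getLastD 0 = PySem.List.pyGetD d (n : Int) 0 ∧
    PySem.List.pyGetD b.2 0 0 = PySem.List.pyGetD d ((n : Int) - a.1) 0 := by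
  induction n with
  | zero =>
    obtain ⟨x, xs, rfl⟩ : ∃ x xs, d = x :: xs := by
      cases d with
      | nil => simp at hn
      | cons x xs => exact ⟨x, xs, rfl⟩
    simp [PySem.List.pyRange_one_eq_nil, fgStep]
  | succ n ih =>
    have hn' : n + 1 ≤ d.length := by omega
    have ih := ih hn'
    have hcast : ((n + 1 : Nat) : Int) = (n : Int) + 1 := by push_cast; ring
    have hsplit : PySem.List.pyRange 0 ((n : Int) + 1) 1
        = PySem.List.pyRange 0 (n : Int) 1 ++ [(n : Int)] :=
      PySem.List.pyRange_one_succ_right (by exact_mod_cast Nat.zero_le n)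
    have htake : d.take (n + 1 + 1) = d.take (n + 1) ++ [d[n + 1]'(by omega)] := by
      rw [List.take_add_one]
      simp [List.getElem?_eq_getElem (by omega : n + 1 < d.length)]
    set a := (PySem.List.pyRange 0 (n : Int) 1).foldl (faStepA d) (0, [], []) with ha
    set b := (d.take (n + 1)).foldl fgStep ([], []) with hb
    obtain ⟨hne, hcnt, hs, he, hlast, hhead⟩ := ih
    have hdn1 : PySem.List.pyGetD d ((n : Int) + 1) 0 = d[n + 1]'(by omega) := by
      rw [show ((n : Int) + 1) = ((n + 1 : Nat) : Int) by push_cast; ring,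
        PySem.List.pyGetD_natCast, List.getD_eq_getElem?_getD,
        List.getElem?_eq_getElem (by omega : n + 1 < d.length)]
      rfl
    rw [hcast, hsplit, htake, List.foldl_append, List.foldl_append, ← ha, ← hb]
    simp only [List.foldl_cons, List.foldl_nil]
    by_cases hc : PySem.List.pyGetD d ((n : Int) + 1) 0 - PySem.List.pyGetD d (n : Int) 0 < 2
    · -- close step: A increments count, B extends cur_run
      have hgc : d[n + 1]'(by omega) - b.2.getLastD 0 < 2 := by
        rw [hlast, ← hdn1]; exact hc
      rw [faStepA, if_pos hc, fgStep, if_pos ⟨hne, hgc⟩]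
      refine ⟨by simp, ?_, hs, he, ?_, ?_⟩
      · simp only [List.length_append, List.length_cons, List.length_nil, hcnt]
        push_cast; ring
      · rw [List.getLastD_concat, hdn1]
      · have : PySem.List.pyGetD (b.2 ++ [d[n + 1]'(by omega)]) 0 0 = PySem.List.pyGetD b.2 0 0 := by
          cases h : b.2 with
          | nil => exact absurd h hne
          | cons y ys => simp [PySem.List.pyGetD_zero_cons]
        rw [this, hhead]
        congr 1
        rw [hcnt]
        push_cast; ring
    · -- gap step: A emits (d[i-count], d[i]), B closes cur_run and starts a new one
      have hgc : ¬ (b.2 ≠ [] ∧ d[n + 1]'(by omega) - b.2.getLastD 0 < 2) := by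
        rw [hlast, ← hdn1]
        intro h; exact hc h.2
      rw [faStepA, if_neg hc, fgStep, if_neg hgc, if_pos hne]
      refine ⟨by simp, by simp, ?_, ?_, ?_, ?_⟩
      · rw [List.map_append, ← hs, List.map_cons, List.map_nil, ← hhead]
      · rw [List.map_append, ← he, List.map_cons, List.map_nil, ← hlast]
      · simp [hdn1]
      · simp [PySem.List.pyGetD_zero_cons, hdn1]

-- ===== VERDICT =====
theorem find_accurate_spec : Claim_equal_find_accurate := by
  intro dis_list _
  unfold Spec_find_accurate find_accurate find_accurate_alt
  cases hd : dis_list with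
  | nil => simp [PySem.List.pyRange_one_eq_nil]
  | cons x xs =>
    have hlen : ((x :: xs).length : Int) - 1 = (xs.length : Nat) := by simp
    have hinv := fa_inv (x :: xs) xs.length (by simp)
    have htake : (x :: xs).take (xs.length + 1) = x :: xs := by
      simp [List.take_of_length_le]
    rw [htake] at hinv
    obtain ⟨-, -, hs, he, -, -⟩ := hinv
    rw [hlen]
    exact Prod.ext hs he
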